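-- pv_equiv track=rewrite | github.com/mimi-netizen/Python-Scripts | cryptography/1. Types of Cyphers/TranspositionCipher_Keyed-Transposition-Cipher.py | keyed_transposition_cipher
-- ===== SOURCE A (Python) =====
-- def prepare_key(key):
--     """
--     Prepares the key by removing duplicates and sorting the characters.
--     """
--     key = ''.join(sorted(set(key.upper())))
--     return key
--
-- def keyed_transposition_cipher(text, key, encrypt=True):
--     """
--     Performs Keyed Transposition Cipher encryption or decryption on the input text.
--
--     Args:
--         text (str): The text to be encrypted or decrypted.
--         key (str): The key for the Keyed Transposition Cipher.
--         encrypt (bool): True to encrypt, False to decrypt.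
--
--     Returns:
--         str: The encrypted or decrypted text.
--     """
--     result = ''
--     key = prepare_key(key)
--     text_length = len(text)
--     columns = len(key)
--     rows = text_length // columns + (text_length % columns > 0)
--     grid = [['' for _ in range(columns)] for _ in range(rows)]
--
--     if encrypt:
--         # Fill the grid row-wise
--         idx = 0
--         for row in range(rows):
--             for col in range(columns):
--                 if idx < text_length:
--                     grid[row][col] = text[idx]
--                     idx += 1
--
--         # Read the grid based on the key
--         for char in key:
--             col = key.index(char)
--             for row in range(rows):
--                 if grid[row][col]:
--                     result += grid[row][col]
--     else:
--         # Fill the grid based on the key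
--         idx = 0
--         for char in key:
--             col = key.index(char)
--             for row in range(rows):
--                 if idx < text_length:
--                     grid[row][col] = text[idx]
--                     idx += 1
--
--         # Read the grid row-wise
--         for row in range(rows):
--             for col in range(columns):
--                 if grid[row][col]:
--                     result += grid[row][col]
--
--     return result
-- ===== SOURCE B (Python) =====
-- def keyed_transposition_cipher(text, key, encrypt=True):
--     columns = len(set(key.upper()))
--     n = len(text)
--     rows = n // columns + (n % columns > 0)
--     if encrypt:
--         return ''.join(text[r * columns + c]
--                        for c in range(columns) for r in range(rows)
--                        if r * columns + c < n)
--     return ''.join(text[c * rows + r]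
--                    for r in range(rows) for c in range(columns)
--                    if c * rows + r < n)
-- ===== Notes on version B (the rewrite author's own statement) =====
-- stated objective: simpler
-- what changed: Replaces A's grid allocation, row/column fill loops with an idx counter, key sorting and per-character key.index scans by closed-form index arithmetic: only the number of distinct key letters matters, and each output character is read directly at position r*columns+c (encrypt) or c*rows+r (decrypt).
import Mathlib
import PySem

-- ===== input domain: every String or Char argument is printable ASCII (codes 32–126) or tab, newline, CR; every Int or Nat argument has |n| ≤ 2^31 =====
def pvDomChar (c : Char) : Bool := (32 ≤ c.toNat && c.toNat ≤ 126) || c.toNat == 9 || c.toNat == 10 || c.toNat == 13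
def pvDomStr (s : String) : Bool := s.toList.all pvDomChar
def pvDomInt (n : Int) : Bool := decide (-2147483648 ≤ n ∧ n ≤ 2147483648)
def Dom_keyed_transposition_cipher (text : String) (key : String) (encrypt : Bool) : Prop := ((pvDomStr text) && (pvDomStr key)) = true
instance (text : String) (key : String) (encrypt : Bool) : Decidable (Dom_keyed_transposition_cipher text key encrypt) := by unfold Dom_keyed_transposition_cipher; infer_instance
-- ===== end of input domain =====

-- B replaces A's grid building, idx counter and key.index scans by closed-form index
-- arithmetic (objective: simpler); both raise ZeroDivisionError on key = "" (excluded by Pre_).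

-- ===== PORT A =====
-- prepare_key: ''.join(sorted(set(key.upper()))) kept as its list of characters
def pvPrepareKey (key : String) : List Char :=
  PySem.List.sorted (PySem.Set.ofList (PySem.Chars.upper key.toList)) (fun c => c) false

-- Grid cells: Python '' is `none`, a stored one-character string text[idx] is `some` that char.
-- rows = text_length // columns raises ZeroDivisionError for columns = 0 (key = ""), excluded by Pre_.
def keyed_transposition_cipher (text : String) (key : String) (encrypt : Bool) : String :=
  let k := pvPrepareKey key
  let t := text.toList
  let text_length := t.length
  let columns := k.length
  let rows := text_length / columns + (if text_length % columns > 0 then 1 else 0)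
  let grid0 : List (List (Option Char)) :=
    (List.range rows).map (fun _ => (List.range columns).map (fun _ => (none : Option Char)))
  let result : List Char :=
    if encrypt then
      let st :=
        (List.range rows).foldl (fun st row =>
          (List.range columns).foldl (fun (st : List (List (Option Char)) × Nat) col =>
            if st.2 < text_length then
              (st.1.modify row (fun r => r.set col t[st.2]?), st.2 + 1)
            else st) st) (grid0, 0)
      k.foldl (fun result ch =>
        let col := (PySem.List.index? k ch).getD 0   -- key.index(char); ch ∈ k so never the default
        (List.range rows).foldl (fun result row =>
          match (st.1.getD row []).getD col none with
          | some c => result ++ [c]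
          | none => result) result) []
    else
      let st :=
        k.foldl (fun st ch =>
          let col := (PySem.List.index? k ch).getD 0
          (List.range rows).foldl (fun (st : List (List (Option Char)) × Nat) row =>
            if st.2 < text_length then
              (st.1.modify row (fun r => r.set col t[st.2]?), st.2 + 1)
            else st) st) (grid0, 0)
      (List.range rows).foldl (fun result row =>
        (List.range columns).foldl (fun result col =>
          match (st.1.getD row []).getD col none with
          | some c => result ++ [c]
          | none => result) result) []
  String.ofList result

-- ===== PORT B =====
-- columns = len(set(key.upper())); n // columns raises ZeroDivisionError for key = "" (excluded by Pre_)
def keyed_transposition_cipher_alt (text : String) (key : String) (encrypt : Bool) : String :=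
  let t := text.toList
  let columns := (PySem.Set.ofList (PySem.Chars.upper key.toList)).length
  let n := t.length
  let rows := n / columns + (if n % columns > 0 then 1 else 0)
  if encrypt then
    String.ofList ((List.range columns).flatMap (fun c =>
      (List.range rows).filterMap (fun r =>
        if r * columns + c < n then t[r * columns + c]? else none)))
  else
    String.ofList ((List.range rows).flatMap (fun r =>
      (List.range columns).filterMap (fun c =>
        if c * rows + r < n then t[c * rows + r]? else none)))

-- ===== PRECONDITION & SPEC =====
-- Pre_ excludes only key = "", where both A and B raise ZeroDivisionError (columns = 0).
def Pre_keyed_transposition_cipher (text : String) (key : String) (encrypt : Bool) : Prop := key ≠ ""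
instance (text : String) (key : String) (encrypt : Bool) : Decidable (Pre_keyed_transposition_cipher text key encrypt) := by unfold Pre_keyed_transposition_cipher; infer_instance
def pvWitness_keyed_transposition_cipher : String × String × Bool := ("HELLOWORLD", "KEY", true)

def Spec_keyed_transposition_cipher (text : String) (key : String) (encrypt : Bool) (out : String) : Prop := out = keyed_transposition_cipher_alt text key encrypt
instance (text : String) (key : String) (encrypt : Bool) (out : String) : Decidable (Spec_keyed_transposition_cipher text key encrypt out) := by unfold Spec_keyed_transposition_cipher; infer_instance

-- ===== CLAIM (what is proved, stated in full; the proofs are below) =====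
def Claim_equal_keyed_transposition_cipher : Prop := ∀ (text : String) (key : String) (encrypt : Bool), Dom_keyed_transposition_cipher text key encrypt → Pre_keyed_transposition_cipher text key encrypt → Spec_keyed_transposition_cipher text key encrypt (keyed_transposition_cipher text key encrypt)

-- ===== LEMMAS AND PROOFS =====

theorem pvIdxOfQ (l : List Char) (a : Char) :
    l.idxOf? a = if a ∈ l then some (l.idxOf a) else none := by
  induction l with
  | nil => simp
  | cons x xs ih =>
      by_cases hx : x = a
      · simp [List.idxOf?_cons, hx]
      · have hax : ¬ a = x := fun h => hx h.symm
        simp [List.idxOf?_cons, hx, hax, ih]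

theorem pvIndexGetD (l : List Char) (hl : l.Nodup) (i : Nat) (h : i < l.length) :
    (PySem.List.index? l l[i]).getD 0 = i := by
  rw [PySem.List.index?_eq_idxOf?, pvIdxOfQ]
  simp [List.getElem_mem h, List.Nodup.idxOf_getElem hl i h]

theorem pvFoldlIndex {σ : Type} (l : List Char) (hl : l.Nodup) (g : σ → Nat → σ) (init : σ) :
    l.foldl (fun st ch => g st ((PySem.List.index? l ch).getD 0)) init
      = (List.range l.length).foldl g init := by
  have hmap : l.map (fun ch => (PySem.List.index? l ch).getD 0) = List.range l.length := by
    apply List.ext_getElem (by simp)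
    intro i h1 h2
    simp only [List.getElem_map, List.getElem_range]
    exact pvIndexGetD l hl i (by simpa using h1)
  rw [← hmap, List.foldl_map]

theorem pvFoldlMatch (v : Nat → Option Char) (l : List Nat) (init : List Char) :
    l.foldl (fun res x => match v x with | some c => res ++ [c] | none => res) init
      = init ++ l.filterMap v := by
  induction l generalizing init with
  | nil => simp
  | cons x xs ih =>
      simp only [List.foldl_cons, List.filterMap_cons]
      cases hv : v x <;> simp [ih]

theorem pvFoldlNested {σ : Type} (R C : Nat) (body : σ → Nat → Nat → σ) (init : σ) :
    (List.range R).foldl (fun st r => (List.range C).foldl (fun st c => body st r c) st) init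
      = (List.range (R * C)).foldl (fun st i => body st (i / C) (i % C)) init := by
  induction R generalizing init with
  | zero => simp
  | succ R ih =>
      rw [List.range_succ, List.foldl_append, ih, Nat.succ_mul, List.range_add, List.foldl_append,
        List.foldl_map]
      simp only [List.foldl_cons, List.foldl_nil]
      apply PySem.List.foldl_congr_mem
      intro acc c hc
      have hcC : c < C := List.mem_range.mp hc
      have h1 : (R * C + c) / C = R := by
        rw [Nat.mul_comm R C, Nat.mul_add_div (by omega)]
        simp [Nat.div_eq_of_lt hcC]
      have h2 : (R * C + c) % C = c := by
        rw [Nat.mul_comm R C, Nat.mul_add_mod]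
        exact Nat.mod_eq_of_lt hcC
      rw [h1, h2]

def pvGridAt (t : List Char) (rows cols : Nat) (inv : Nat → Nat → Nat) (j : Nat) :
    List (List (Option Char)) :=
  (List.range rows).map (fun r => (List.range cols).map (fun c =>
    if inv r c < j then t[inv r c]? else none))

theorem pvFill (t : List Char) (rows cols n : Nat) (cR cC : Nat → Nat) (inv : Nat → Nat → Nat)
    (h1 : ∀ i, i < rows * cols → cR i < rows ∧ cC i < cols ∧ inv (cR i) (cC i) = i)
    (h2 : ∀ r c, r < rows → c < cols → inv r c < rows * cols → cR (inv r c) = r ∧ cC (inv r c) = c)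
    (j : Nat) (hj : j ≤ rows * cols) :
    (List.range j).foldl (fun (st : List (List (Option Char)) × Nat) i =>
        if st.2 < n then (st.1.modify (cR i) (fun rw => rw.set (cC i) t[st.2]?), st.2 + 1) else st)
      (pvGridAt t rows cols inv 0, 0)
      = (pvGridAt t rows cols inv (min j n), min j n) := by
  induction j with
  | zero => simp
  | succ j ih =>
      have hjlt : j < rows * cols := by omega
      rw [List.range_succ, List.foldl_append, ih (by omega), List.foldl_cons, List.foldl_nil]
      obtain ⟨hcR, hcC, hinvj⟩ := h1 j hjlt
      by_cases hlt : min j n < n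
      · have hjn : j < n := by omega
        have hmj : min j n = j := by omega
        have hmj1 : min (j + 1) n = j + 1 := by omega
        simp only [hmj, hmj1]
        rw [if_pos hjn]
        refine Prod.ext ?_ rfl
        dsimp only
        apply List.ext_getElem
        · simp [pvGridAt, List.length_modify]
        · intro r hr1 hr2
          have hrrows : r < rows := by simpa [pvGridAt, List.length_modify] using hr1
          rw [List.getElem_modify]
          by_cases hre : cR j = r
          · subst hre
            simp only [if_true]
            apply List.ext_getElem
            · simp [pvGridAt]
            · intro c hc1 hc2
              have hccols : c < cols := by simpa [pvGridAt] using hc2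
              rw [List.getElem_set]
              by_cases hce : cC j = c
              · subst hce
                simp [pvGridAt, hinvj]
              · have hne : inv (cR j) c ≠ j := by
                  intro he
                  have hlt' : inv (cR j) c < rows * cols := by omega
                  have := (h2 (cR j) c hcR hccols hlt').2
                  rw [he] at this
                  exact hce this
                simp only [if_neg hce]
                simp only [pvGridAt, List.getElem_map, List.getElem_range]
                simp only [show (inv (cR j) c < j + 1) ↔ inv (cR j) c < j by omega]
          · simp only [if_neg hre]
            simp only [pvGridAt, List.getElem_map, List.getElem_range]
            apply List.map_congr_left
            intro c hc
            have hccols : c < cols := List.mem_range.mp hc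
            have hne : inv r c ≠ j := by
              intro he
              have hlt' : inv r c < rows * cols := by omega
              have := (h2 r c hrrows hccols hlt').1
              rw [he] at this
              exact hre this
            simp only [show (inv r c < j + 1) ↔ inv r c < j by omega]
      · have hmn : min j n = n := by omega
        have hmn1 : min (j + 1) n = n := by omega
        simp only [hmn, hmn1]
        rw [if_neg (lt_irrefl n)]

theorem pvCap (n columns : Nat) (hc : 0 < columns) :
    n ≤ (n / columns + (if n % columns > 0 then 1 else 0)) * columns := by
  have hdm := Nat.div_add_mod n columns
  have hmlt : n % columns < columns := Nat.mod_lt _ hc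
  by_cases h0 : n % columns > 0
  · simp only [h0, if_pos]
    calc n = columns * (n / columns) + n % columns := hdm.symm
    _ ≤ columns * (n / columns) + columns := by omega
    _ = (n / columns + 1) * columns := by ring
  · have h1 : n % columns = 0 := by omega
    have hdvd : columns ∣ n := Nat.dvd_of_mod_eq_zero h1
    simp [h1, Nat.div_mul_cancel hdvd]

-- the common value of cell (row, col) of the filled grid, read with Python's .getD defaults
theorem pvCell (t : List Char) (rows cols n : Nat) (inv : Nat → Nat → Nat)
    (row col : Nat) (hr : row < rows) (hc : col < cols) :
    ((pvGridAt t rows cols inv n).getD row []).getD col none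
      = if inv row col < n then t[inv row col]? else none := by
  simp [pvGridAt, List.getD_eq_getElem?_getD, hr, hc]

theorem pvMain (text key : String) (encrypt : Bool) (hk : key ≠ "") :
    keyed_transposition_cipher text key encrypt = keyed_transposition_cipher_alt text key encrypt := by
  have hkl : key.toList ≠ [] := by simpa [String.toList_eq_nil_iff] using hk
  have hpw : (pvPrepareKey key).Pairwise (· < ·) :=
    PySem.List.sorted_ofList_pairwise_lt (PySem.Chars.upper key.toList)
  have hnd : (pvPrepareKey key).Nodup := hpw.imp ne_of_lt
  have hlen : (pvPrepareKey key).length = (PySem.Set.ofList (PySem.Chars.upper key.toList)).length :=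
    PySem.List.length_sorted _ _ _
  have hne : pvPrepareKey key ≠ [] := by
    rw [pvPrepareKey, Ne, PySem.List.sorted_eq_nil_iff]
    intro h
    have : PySem.Chars.upper key.toList = [] := by
      cases hu : PySem.Chars.upper key.toList with
      | nil => rfl
      | cons x xs =>
          exfalso
          have hx : x ∈ PySem.Set.ofList (PySem.Chars.upper key.toList) := by
            rw [PySem.Set.mem_ofList, hu]; exact List.mem_cons_self
          rw [h] at hx
          exact (List.not_mem_nil hx)
    exact hkl (by simpa [PySem.Chars.upper] using this)
  set kk := pvPrepareKey key with hkk
  set t := text.toList with ht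
  set n := t.length with hn
  set columns := kk.length with hcolumns
  have hcols : 0 < columns := List.length_pos_of_ne_nil hne
  set rows := n / columns + (if n % columns > 0 then 1 else 0) with hrows
  have hcap : n ≤ rows * columns := pvCap n columns hcols
  have hg0 : (List.range rows).map (fun _ => (List.range columns).map (fun _ => (none : Option Char)))
      = pvGridAt t rows columns (fun r c => r * columns + c) 0 := by
    simp [pvGridAt]
  cases encrypt with
  | true =>
      simp only [keyed_transposition_cipher, keyed_transposition_cipher_alt, ← hkk, ← ht, ← hn,
        ← hcolumns, ← hrows, if_pos]
      rw [hg0, pvFoldlNested]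
      have hE1 : ∀ i, i < rows * columns →
          i / columns < rows ∧ i % columns < columns ∧ (i / columns) * columns + i % columns = i := by
        intro i hi
        refine ⟨(Nat.div_lt_iff_lt_mul hcols).mpr (by omega), Nat.mod_lt _ hcols, ?_⟩
        rw [Nat.mul_comm]
        exact Nat.div_add_mod i columns
      have hE2 : ∀ r c, r < rows → c < columns → r * columns + c < rows * columns →
          (r * columns + c) / columns = r ∧ (r * columns + c) % columns = c := by
        intro r c hr hc _
        constructor
        · rw [Nat.mul_comm r columns, Nat.mul_add_div hcols, Nat.div_eq_of_lt hc]
          omega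
        · rw [Nat.mul_comm r columns, Nat.mul_add_mod]
          exact Nat.mod_eq_of_lt hc
      rw [pvFill t rows columns n (fun i => i / columns) (fun i => i % columns)
        (fun r c => r * columns + c) hE1 hE2 (rows * columns) le_rfl,
        Nat.min_eq_right hcap]
      simp only [← hlen, ← hrows]
      rw [hcolumns, pvFoldlIndex (σ := List Char) kk hnd (fun result col =>
        (List.range rows).foldl (fun result row =>
          match ((pvGridAt t rows columns (fun r c => r * columns + c) n, n).1.getD row []).getD
            col none with
          | some c => result ++ [c]
          | none => result) result) [], ← hcolumns]
      simp only [pvFoldlMatch, PySem.List.foldl_append_eq_flatMap, List.nil_append]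
      apply congrArg String.ofList
      apply List.flatMap_congr
      intro col hcol
      have hccol : col < columns := List.mem_range.mp hcol
      apply List.filterMap_congr
      intro row hrow
      have hrrow : row < rows := List.mem_range.mp hrow
      exact pvCell t rows columns n (fun r c => r * columns + c) row col hrrow hccol
  | false =>
      simp only [keyed_transposition_cipher, keyed_transposition_cipher_alt, ← hkk, ← ht, ← hn,
        ← hcolumns, ← hrows, Bool.false_eq_true, if_false]
      have hg0d : (List.range rows).map (fun _ => (List.range columns).map (fun _ => (none : Option Char)))
          = pvGridAt t rows columns (fun r c => c * rows + r) 0 := by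
        simp [pvGridAt]
      have hrpos : ∀ i, i < rows * columns → 0 < rows := by
        intro i hi
        rcases Nat.eq_zero_or_pos rows with h | h
        · rw [h, Nat.zero_mul] at hi
          omega
        · exact h
      have hD1 : ∀ i, i < rows * columns →
          i % rows < rows ∧ i / rows < columns ∧ (i / rows) * rows + i % rows = i := by
        intro i hi
        have hr0 : 0 < rows := hrpos i hi
        refine ⟨Nat.mod_lt _ hr0, (Nat.div_lt_iff_lt_mul hr0).mpr (by rw [Nat.mul_comm]; exact hi), ?_⟩
        rw [Nat.mul_comm]
        exact Nat.div_add_mod i rows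
      have hD2 : ∀ r c, r < rows → c < columns → c * rows + r < rows * columns →
          (c * rows + r) % rows = r ∧ (c * rows + r) / rows = c := by
        intro r c hr hc _
        have hr0 : 0 < rows := by omega
        constructor
        · rw [Nat.mul_comm c rows, Nat.mul_add_mod]
          exact Nat.mod_eq_of_lt hr
        · rw [Nat.mul_comm c rows, Nat.mul_add_div hr0, Nat.div_eq_of_lt hr]
          omega
      have hcap' : n ≤ columns * rows := by rw [Nat.mul_comm]; exact hcap
      rw [hg0d, hcolumns, pvFoldlIndex (σ := List (List (Option Char)) × Nat) kk hnd
        (fun st col => (List.range rows).foldl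
          (fun (st : List (List (Option Char)) × Nat) row =>
            if st.2 < n then (st.1.modify row (fun r => r.set col t[st.2]?), st.2 + 1) else st) st)
        (pvGridAt t rows columns (fun r c => c * rows + r) 0, 0), ← hcolumns]
      rw [pvFoldlNested (σ := List (List (Option Char)) × Nat) columns rows
        (fun st col row => if st.2 < n then (st.1.modify row (fun r => r.set col t[st.2]?), st.2 + 1) else st)
        (pvGridAt t rows columns (fun r c => c * rows + r) 0, 0)]
      rw [pvFill t rows columns n (fun i => i % rows) (fun i => i / rows)
        (fun r c => c * rows + r) hD1 hD2 (columns * rows) (Nat.mul_comm columns rows ▸ le_rfl),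
        Nat.min_eq_right hcap']
      simp only [← hlen, ← hrows]
      simp only [pvFoldlMatch, PySem.List.foldl_append_eq_flatMap, List.nil_append]
      apply congrArg String.ofList
      apply List.flatMap_congr
      intro row hrow
      have hrrow : row < rows := List.mem_range.mp hrow
      apply List.filterMap_congr
      intro col hcol
      have hccol : col < columns := List.mem_range.mp hcol
      exact pvCell t rows columns n (fun r c => c * rows + r) row col hrrow hccol

-- ===== VERDICT (by name: the statement is the Claim_ definition above) =====
theorem keyed_transposition_cipher_spec : Claim_equal_keyed_transposition_cipher := by
  intro text key encrypt _ hpre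
  exact pvMain text key encrypt hpre
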